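-- pv_equiv track=rewrite | github.com/Biocomputing-Research-Group/WinnowNet | WinnowNet_Att.py | pad_control
-- ===== SOURCE A (Python) =====
-- pairmaxlength=500
--
-- def pad_control(data):
--     data = sorted(data, key=lambda x: x[1], reverse=True)
--     if len(data) > pairmaxlength:
--         data = data[:pairmaxlength]
--     else:
--         while (len(data) < pairmaxlength):
--             data.append([0, 0])
--     data = sorted(data, key=lambda x: x[0])
--     return data
-- ===== SOURCE B (Python) =====
-- pairmaxlength = 500
--
--
-- def _ksmallest(items, k):
--     """The k items with the smallest keys (item = (key, payload); keys are
--     pairwise distinct), by quickselect-style partitioning; order unspecified."""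
--     if k <= 0:
--         return []
--     if len(items) <= k:
--         return items
--     pkey = items[len(items) // 2][0]
--     lo = [x for x in items if x[0] < pkey]
--     if k <= len(lo):
--         return _ksmallest(lo, k)
--     mid = [x for x in items if x[0] == pkey]
--     hi = [x for x in items if x[0] > pkey]
--     return lo + mid + _ksmallest(hi, k - len(lo) - len(mid))
--
--
-- def pad_control(data):
--     keyed = [((-row[1], i), row) for i, row in enumerate(data)]
--     top = sorted(_ksmallest(keyed, pairmaxlength), key=lambda t: t[0])
--     kept = [row for _, row in top]
--     kept += [[0, 0]] * (pairmaxlength - len(kept))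
--     kept.sort(key=lambda row: row[0])
--     return kept
-- ===== Notes on version B (the rewrite author's own statement) =====
-- stated objective: alternative
-- what changed: B selects the 500 rows with the largest second values by quickselect-style recursive partitioning on decorated (-value, position) keys instead of fully sorting the whole list and slicing, then sorts only the selected 500, pads arithmetically, and does the final sort by first value; Pre_ excludes exactly the inputs on which A raises IndexError (a row shorter than 2).
import Mathlib
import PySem

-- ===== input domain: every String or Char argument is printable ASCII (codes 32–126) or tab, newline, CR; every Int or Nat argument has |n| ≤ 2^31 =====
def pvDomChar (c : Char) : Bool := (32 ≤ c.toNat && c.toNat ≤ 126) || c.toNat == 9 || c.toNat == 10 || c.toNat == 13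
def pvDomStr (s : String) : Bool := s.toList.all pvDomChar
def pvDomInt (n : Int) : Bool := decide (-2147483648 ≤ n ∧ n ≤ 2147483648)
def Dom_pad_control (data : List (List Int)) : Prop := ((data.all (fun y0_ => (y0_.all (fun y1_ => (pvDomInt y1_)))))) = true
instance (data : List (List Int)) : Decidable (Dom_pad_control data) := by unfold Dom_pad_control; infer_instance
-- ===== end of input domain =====

-- B replaces A's full sort + slice selection by a quickselect-style recursive
-- partition on decorated (-value, position) keys that extracts the 500 kept rows,
-- sorts only those, and pads arithmetically; objective: alternative (no speed claim).

-- ===== PORT A =====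
-- 'while len(data) < pairmaxlength: data.append([0,0])' — fuel is the exact number of iterations
def padLoopA (k : Nat) (acc : List (List Int)) : List (List Int) :=
  match k with
  | 0 => acc
  | k + 1 => padLoopA k (acc ++ [[0, 0]])

def pad_control (data : List (List Int)) : List (List Int) :=
  let d1 := PySem.List.sorted data (fun x => PySem.List.pyGetD x 1 0) true
  let d2 := if 500 < (PySem.List.len d1) then PySem.List.slice d1 none (some 500)
            else padLoopA (500 - d1.length) d1
  PySem.List.sorted d2 (fun x => PySem.List.pyGetD x 0 0) false

-- ===== PORT B =====
-- '_ksmallest(items, k)': quickselect-style partition; 'x[0] < pkey' is Python tuple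
-- comparison = lexicographic on Int × Int (toLex); 'items[len(items)//2]' is in range
-- in the branch where it is read (k ≥ 1 < len items), so getD is exact there.
def ksmallest (items : List ((Int × Int) × List Int)) (k : Int) :
    List ((Int × Int) × List Int) :=
  if k ≤ 0 then []
  else if (PySem.List.len items) ≤ k then items
  else
    let pkey := (items.getD (items.length / 2) ((0, 0), [])).1
    let lo := items.filter (fun x => decide ((toLex x.1 : Int ×ₗ Int) < toLex pkey))
    if k ≤ (PySem.List.len lo) then ksmallest lo k
    else
      let mid := items.filter (fun x => x.1 == pkey)
      let hi := items.filter (fun x => decide ((toLex pkey : Int ×ₗ Int) < toLex x.1))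
      lo ++ mid ++ ksmallest hi (k - lo.length - mid.length)
termination_by items.length
decreasing_by
  · have _hk : ¬ k ≤ 0 := by assumption
    have hlen : ¬ (PySem.List.len items) ≤ k := by assumption
    have hpos : 0 < items.length := by
      rw [PySem.List.len_eq] at hlen; omega
    have hidx : items.length / 2 < items.length := Nat.div_lt_self hpos (by omega)
    have hm : items.getD (items.length / 2) ((0, 0), []) ∈ items := by
      rw [List.getD_eq_getElem items _ hidx]; exact items.getElem_mem hidx
    rw [List.unattach_filter
        (g := fun x => decide ((toLex x.1 : Int ×ₗ Int)
          < toLex (items.getD (items.length / 2) ((0, 0), [])).1))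
        (hf := fun x h => rfl), List.unattach_attach]
    refine List.length_filter_lt_length_iff_exists.mpr ⟨_, hm, ?_⟩
    simp
  · have _hk : ¬ k ≤ 0 := by assumption
    have hlen : ¬ (PySem.List.len items) ≤ k := by assumption
    have hpos : 0 < items.length := by
      rw [PySem.List.len_eq] at hlen; omega
    have hidx : items.length / 2 < items.length := Nat.div_lt_self hpos (by omega)
    have hm : items.getD (items.length / 2) ((0, 0), []) ∈ items := by
      rw [List.getD_eq_getElem items _ hidx]; exact items.getElem_mem hidx
    rw [List.unattach_filter
        (g := fun x => decide ((toLex (items.getD (items.length / 2) ((0, 0), [])).1 : Int ×ₗ Int)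
          < toLex x.1))
        (hf := fun x h => rfl), List.unattach_attach]
    refine List.length_filter_lt_length_iff_exists.mpr ⟨_, hm, ?_⟩
    simp

def pad_control_alt (data : List (List Int)) : List (List Int) :=
  let keyed := (PySem.List.enumerate data 0).map
    (fun p => ((-(PySem.List.pyGetD p.2 1 0), p.1), p.2))
  let top := PySem.List.sorted (ksmallest keyed 500) (fun t => (toLex t.1 : Int ×ₗ Int)) false
  let kept := top.map (fun t => t.2)
  let kept2 := kept ++ PySem.List.pyRepeat [[0, 0]] (500 - PySem.List.len kept)
  PySem.List.sorted kept2 (fun row => PySem.List.pyGetD row 0 0) false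

-- ===== PRECONDITION & SPEC =====
-- Pre_ excludes exactly the inputs on which Python A raises IndexError: a row shorter than 2 (x[1]/x[0]).
def Pre_pad_control (data : List (List Int)) : Prop := ∀ row ∈ data, 2 ≤ row.length
instance (data : List (List Int)) : Decidable (Pre_pad_control data) := by unfold Pre_pad_control; infer_instance
def pvWitness_pad_control : List (List Int) := ([[1, 2], [3, 4]])

def Spec_pad_control (data : List (List Int)) (out : List (List Int)) : Prop := out = pad_control_alt data
instance (data : List (List Int)) (out : List (List Int)) : Decidable (Spec_pad_control data out) := by unfold Spec_pad_control; infer_instance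

-- ===== CLAIM (what is proved, stated in full; the proofs are below) =====
def Claim_equal_pad_control : Prop := ∀ (data : List (List Int)), Dom_pad_control data → Pre_pad_control data → Spec_pad_control data (pad_control data)

-- ===== LEMMAS AND PROOFS =====

-- map commutes with insertBy when the comparison only looks through f
theorem insertBy_map {α β : Type} (f : α → β) (bf : β → β → Bool) (x : α) (l : List α) :
    (PySem.List.insertBy (fun a b => bf (f a) (f b)) x l).map f
      = PySem.List.insertBy bf (f x) (l.map f) := by
  induction l with
  | nil => simp [PySem.List.insertBy]
  | cons y ys ih => by_cases h : bf (f x) (f y) <;> simp [PySem.List.insertBy, h, ih]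

theorem foldl_insertBy_map {α β : Type} (f : α → β) (bf : β → β → Bool) (xs : List α) (acc : List α) :
    (xs.foldl (fun acc x => PySem.List.insertBy (fun a b => bf (f a) (f b)) x acc) acc).map f
      = (xs.map f).foldl (fun acc y => PySem.List.insertBy bf y acc) (acc.map f) := by
  induction xs generalizing acc with
  | nil => rfl
  | cons x xs ih => simp only [List.foldl_cons, List.map_cons, ih, insertBy_map]

-- a sort of a mapped list, when the key factors through the map
theorem sorted_map_eq {α β κ : Type} [LT κ] [DecidableLT κ] (f : α → β) (key : β → κ) (l : List α) :
    PySem.List.sorted (l.map f) key false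
      = (PySem.List.sorted l (fun x => key (f x)) false).map f := by
  rw [PySem.List.sorted_eq_foldl_insertBy, PySem.List.sorted_eq_foldl_insertBy]
  exact (foldl_insertBy_map f (fun a b => decide (key a < key b)) l []).symm

theorem insertBy_congr {α : Type} (b1 b2 : α → α → Bool) (x : α) (l : List α)
    (h : ∀ y ∈ l, b1 x y = b2 x y) :
    PySem.List.insertBy b1 x l = PySem.List.insertBy b2 x l := by
  induction l with
  | nil => rfl
  | cons y ys ih =>
    have hy := h y (by simp)
    by_cases hb : b1 x y
    · simp [PySem.List.insertBy, hb, hy ▸ hb]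
    · have : b2 x y = false := by rw [← hy]; simpa using hb
      simp [PySem.List.insertBy, hb, this]
      exact ih (fun y hy' => h y (by simp [hy']))

theorem foldl_insertBy_congr {α : Type} (b1 b2 : Int × α → Int × α → Bool)
    (l acc : List (Int × α))
    (hl : l.Pairwise (fun p q => p.1 < q.1))
    (hacc : ∀ y ∈ acc, ∀ x ∈ l, y.1 < x.1)
    (h : ∀ x y, y.1 < x.1 → b1 x y = b2 x y) :
    l.foldl (fun a x => PySem.List.insertBy b1 x a) acc
      = l.foldl (fun a x => PySem.List.insertBy b2 x a) acc := by
  induction l generalizing acc with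
  | nil => rfl
  | cons x t ih =>
    have hlt := List.pairwise_cons.mp hl
    have hstep : PySem.List.insertBy b1 x acc = PySem.List.insertBy b2 x acc :=
      insertBy_congr b1 b2 x acc (fun y hy => h x y (hacc y hy x (by simp)))
    simp only [List.foldl_cons, hstep]
    refine ih _ hlt.2 (fun y hy x' hx' => ?_)
    rcases (PySem.List.mem_insertBy b2 x y acc).mp hy with rfl | hy'
    · exact hlt.1 x' hx'
    · exact hacc y hy' x' (by simp [hx'])

-- a Python stable sort, seen through position decoration
theorem sorted_eq_map_snd {α κ : Type} [LT κ] [DecidableLT κ] (l : List α) (key : α → κ) (rev : Bool) :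
    PySem.List.sorted l key rev
      = (PySem.List.sorted (PySem.List.enumerate l 0) (fun p => key p.2) rev).map Prod.snd := by
  cases rev
  · rw [PySem.List.sorted_eq_foldl_insertBy, PySem.List.sorted_eq_foldl_insertBy]
    have h := foldl_insertBy_map (Prod.snd : Int × α → α)
      (fun a b => decide (key a < key b)) (PySem.List.enumerate l 0) []
    rw [h, PySem.List.map_snd_enumerate]
    rfl
  · rw [PySem.List.sorted_rev_eq_foldl_insertBy, PySem.List.sorted_rev_eq_foldl_insertBy]
    have h := foldl_insertBy_map (Prod.snd : Int × α → α)
      (fun a b => decide (key b < key a)) (PySem.List.enumerate l 0) []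
    rw [h, PySem.List.map_snd_enumerate]
    rfl

-- reverse sort by key = forward sort of the decorated list by lex (-key, position)
theorem sorted_rev_via_enumerate {α : Type} (l : List α) (key : α → Int) :
    PySem.List.sorted l key true
      = (PySem.List.sorted (PySem.List.enumerate l 0)
          (fun p => (toLex (-(key p.2), p.1) : Int ×ₗ Int)) false).map Prod.snd := by
  rw [sorted_eq_map_snd l key true]
  congr 1
  rw [PySem.List.sorted_rev_eq_foldl_insertBy, PySem.List.sorted_eq_foldl_insertBy]
  refine foldl_insertBy_congr _ _ _ [] (PySem.List.pairwise_lt_enumerate l 0) (by simp) ?_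
  intro x y hyx
  simp only [decide_eq_decide]
  rw [Prod.Lex.toLex_lt_toLex]
  constructor
  · intro h; exact Or.inl (by omega)
  · rintro (h | ⟨_, h⟩) <;> omega

-- sorted with pairwise-distinct keys is strictly increasing
theorem sorted_pairwise_lt_of_nodup {α κ : Type} [LinearOrder κ] (l : List α) (key : α → κ)
    (hnd : (l.map key).Nodup) :
    (PySem.List.sorted l key false).Pairwise (fun a b => key a < key b) := by
  have hle := PySem.List.sorted_pairwise l key
  have hnd' : ((PySem.List.sorted l key false).map key).Nodup :=
    ((PySem.List.sorted_perm l key false).map key).symm.nodup hnd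
  have hne : (PySem.List.sorted l key false).Pairwise (fun a b => key a ≠ key b) :=
    (List.pairwise_map.mp hnd')
  exact (hle.and hne).imp (fun h => lt_of_le_of_ne h.1 h.2)

theorem nodup_key_filter {α κ : Type} (l : List α) (key : α → κ) (p : α → Bool)
    (hnd : (l.map key).Nodup) : ((l.filter p).map key).Nodup :=
  List.Nodup.sublist (List.Sublist.map key ((List.filter_sublist (p := p) (l := l)))) hnd

-- partition of a sort around a pivot key value (distinct keys)
theorem sorted_partition {α κ : Type} [LinearOrder κ] (l : List α) (key : α → κ) (pk : κ)
    (hnd : (l.map key).Nodup) :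
    PySem.List.sorted l key false
      = PySem.List.sorted (l.filter (fun x => decide (key x < pk))) key false
        ++ PySem.List.sorted (l.filter (fun x => decide (key x = pk))) key false
        ++ PySem.List.sorted (l.filter (fun x => decide (pk < key x))) key false := by
  have e1 : ∀ x : α, (decide (key x = pk) && !decide (key x < pk)) = decide (key x = pk) := by
    intro x; by_cases h : key x = pk <;> simp [h]
  have e2 : ∀ x : α, (!decide (key x = pk) && !decide (key x < pk)) = decide (pk < key x) := by
    intro x
    rcases lt_trichotomy (key x) pk with h | h | h
    · simp [h, h.ne, lt_asymm h]
    · simp [h]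
    · simp [h, h.ne', lt_asymm h]
  have hmid : l.filter (fun x => decide (key x = pk))
      = (l.filter (fun x => !decide (key x < pk))).filter (fun x => decide (key x = pk)) := by
    rw [List.filter_filter]
    exact (List.filter_congr (fun x _ => e1 x)).symm
  have hhi : l.filter (fun x => decide (pk < key x))
      = (l.filter (fun x => !decide (key x < pk))).filter (fun x => !decide (key x = pk)) := by
    rw [List.filter_filter]
    exact (List.filter_congr (fun x _ => e2 x)).symm
  have p1 := PySem.List.sorted_perm (l.filter (fun x => decide (key x < pk))) key false
  have p2 := PySem.List.sorted_perm (l.filter (fun x => decide (key x = pk))) key false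
  have p3 := PySem.List.sorted_perm (l.filter (fun x => decide (pk < key x))) key false
  have mlo : ∀ a ∈ PySem.List.sorted (l.filter (fun x => decide (key x < pk))) key false,
      key a < pk := by
    intro a ha
    rw [PySem.List.mem_sorted] at ha
    exact of_decide_eq_true ((List.mem_filter.mp ha).2)
  have mmid : ∀ a ∈ PySem.List.sorted (l.filter (fun x => decide (key x = pk))) key false,
      key a = pk := by
    intro a ha
    rw [PySem.List.mem_sorted] at ha
    exact of_decide_eq_true ((List.mem_filter.mp ha).2)
  have mhi : ∀ a ∈ PySem.List.sorted (l.filter (fun x => decide (pk < key x))) key false,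
      pk < key a := by
    intro a ha
    rw [PySem.List.mem_sorted] at ha
    exact of_decide_eq_true ((List.mem_filter.mp ha).2)
  refine PySem.List.sorted_eq_of_perm_of_pairwise_lt _ _ _ ?_ ?_
  · rw [List.append_assoc]
    refine (p1.append (p2.append p3)).trans ?_
    refine ((List.Perm.refl _).append ?_).trans (List.filter_append_perm _ l)
    rw [hmid, hhi]
    exact List.filter_append_perm _ _
  · rw [List.append_assoc]
    rw [List.pairwise_append]
    refine ⟨sorted_pairwise_lt_of_nodup _ key (nodup_key_filter l key _ hnd), ?_, ?_⟩
    · rw [List.pairwise_append]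
      refine ⟨sorted_pairwise_lt_of_nodup _ key (nodup_key_filter l key _ hnd),
        sorted_pairwise_lt_of_nodup _ key (nodup_key_filter l key _ hnd), ?_⟩
      intro a ha b hb
      rw [mmid a ha]
      exact mhi b hb
    · intro a ha b hb
      rcases List.mem_append.mp hb with hb | hb
      · rw [mmid b hb]; exact mlo a ha
      · exact (mlo a ha).trans (mhi b hb)

-- with distinct keys and the pivot taken from l, the equal-key block is a singleton
theorem mid_length_one {α κ : Type} [DecidableEq κ] (l : List α) (key : α → κ) (m : α)
    (hm : m ∈ l) (hnd : (l.map key).Nodup) :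
    (l.filter (fun x => decide (key x = key m))).length = 1 := by
  have hmem : m ∈ l.filter (fun x => decide (key x = key m)) :=
    List.mem_filter.mpr ⟨hm, by simp⟩
  have hrep : (l.filter (fun x => decide (key x = key m))).map key
      = List.replicate ((l.filter (fun x => decide (key x = key m))).map key).length (key m) := by
    refine List.eq_replicate_length.mpr ?_
    intro b hb
    rcases List.mem_map.mp hb with ⟨x, hx, rfl⟩
    exact of_decide_eq_true ((List.mem_filter.mp hx).2)
  have hndm : ((l.filter (fun x => decide (key x = key m))).map key).Nodup :=
    nodup_key_filter l key _ hnd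
  rw [hrep] at hndm
  rw [List.nodup_replicate] at hndm
  simp only [List.length_map] at hndm
  have h1 : 0 < (l.filter (fun x => decide (key x = key m))).length :=
    List.length_pos_of_mem hmem
  omega

theorem unattach_filter_eq {α : Type} (l : List α) (p : α → Bool) :
    (List.filter (fun x : {y // y ∈ l} => p x.1) l.attach).unattach = l.filter p := by
  rw [List.unattach_filter (g := p) (hf := fun x h => rfl), List.unattach_attach]

-- quickselect returns exactly the k smallest (as a multiset)
theorem ksmallest_perm (items : List ((Int × Int) × List Int)) (k : Int)
    (hnd : (items.map (fun t => (toLex t.1 : Int ×ₗ Int))).Nodup) :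
    (ksmallest items k).Perm
      ((PySem.List.sorted items (fun t => (toLex t.1 : Int ×ₗ Int)) false).take k.toNat) := by
  revert hnd
  induction items, k using ksmallest.induct with
  | case1 items k hk =>
    intro hnd
    rw [ksmallest.eq_def, if_pos hk]
    have h0 : k.toNat = 0 := by omega
    simp [h0]
  | case2 items k hk hlen =>
    intro hnd
    rw [ksmallest.eq_def, if_neg hk, if_pos hlen]
    have h1 : (PySem.List.sorted items (fun t => (toLex t.1 : Int ×ₗ Int)) false).length ≤ k.toNat := by
      rw [PySem.List.length_sorted]
      rw [PySem.List.len_eq] at hlen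
      omega
    rw [List.take_of_length_le h1]
    exact (PySem.List.sorted_perm _ _ _).symm
  | case3 items k hk hlen pkey lo hlo ih =>
    intro hnd
    simp only [lo] at hlo ih
    rw [unattach_filter_eq items (fun x => decide ((toLex x.1 : Int ×ₗ Int) < toLex pkey))] at hlo ih
    simp only [pkey] at hlo ih
    have hnd' := nodup_key_filter items (fun t => (toLex t.1 : Int ×ₗ Int))
      (fun x => decide ((toLex x.1 : Int ×ₗ Int)
        < toLex (items.getD (items.length / 2) ((0, 0), [])).1)) hnd
    specialize ih hnd'
    rw [ksmallest.eq_def, if_neg hk, if_neg hlen, if_pos hlo]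
    rw [sorted_partition items (fun t => (toLex t.1 : Int ×ₗ Int))
      (toLex (items.getD (items.length / 2) ((0, 0), [])).1) hnd]
    have hle : k.toNat ≤ (PySem.List.sorted (items.filter (fun x =>
        decide ((toLex x.1 : Int ×ₗ Int) < toLex (items.getD (items.length / 2) ((0, 0), [])).1)))
        (fun t => (toLex t.1 : Int ×ₗ Int)) false).length := by
      rw [PySem.List.length_sorted]
      rw [PySem.List.len_eq] at hlo
      omega
    rw [List.append_assoc, List.take_append_of_le_length hle]
    exact ih
  | case4 items k hk hlen pkey lo hnlo mid hi ih =>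
    intro hnd
    simp only [lo, mid, hi] at hnlo ih
    simp only [pkey] at hnlo ih
    rw [unattach_filter_eq items (fun x => decide ((toLex x.1 : Int ×ₗ Int)
      < toLex (items.getD (items.length / 2) ((0, 0), [])).1))] at hnlo ih
    rw [unattach_filter_eq items (fun x => x.1 == (items.getD (items.length / 2) ((0, 0), [])).1),
      unattach_filter_eq items (fun x => decide ((toLex (items.getD (items.length / 2) ((0, 0), [])).1 : Int ×ₗ Int)
        < toLex x.1))] at ih
    have hpos : 0 < items.length := by rw [PySem.List.len_eq] at hlen; omega
    have hidx : items.length / 2 < items.length := Nat.div_lt_self hpos (by omega)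
    have hm : items.getD (items.length / 2) ((0, 0), []) ∈ items := by
      rw [List.getD_eq_getElem items _ hidx]; exact items.getElem_mem hidx
    have hmideq : items.filter (fun x => x.1 == (items.getD (items.length / 2) ((0, 0), [])).1)
        = items.filter (fun x => decide ((toLex x.1 : Int ×ₗ Int)
            = toLex (items.getD (items.length / 2) ((0, 0), [])).1)) := by
      refine List.filter_congr ?_
      intro x _
      exact Bool.eq_iff_iff.mpr (by simp)
    have hmidlen : (items.filter (fun x => decide ((toLex x.1 : Int ×ₗ Int)
        = toLex (items.getD (items.length / 2) ((0, 0), [])).1))).length = 1 :=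
      mid_length_one items (fun t => (toLex t.1 : Int ×ₗ Int)) _ hm hnd
    have hndhi := nodup_key_filter items (fun t => (toLex t.1 : Int ×ₗ Int))
      (fun x => decide ((toLex (items.getD (items.length / 2) ((0, 0), [])).1 : Int ×ₗ Int)
        < toLex x.1)) hnd
    rw [hmideq] at ih
    specialize ih hndhi
    rw [ksmallest.eq_def, if_neg hk, if_neg hlen, if_neg hnlo]
    rw [hmideq]
    rw [sorted_partition items (fun t => (toLex t.1 : Int ×ₗ Int))
      (toLex (items.getD (items.length / 2) ((0, 0), [])).1) hnd]
    rw [List.append_assoc, List.take_append, List.take_append]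
    have hlolen : (PySem.List.sorted (items.filter (fun x =>
        decide ((toLex x.1 : Int ×ₗ Int) < toLex (items.getD (items.length / 2) ((0, 0), [])).1)))
        (fun t => (toLex t.1 : Int ×ₗ Int)) false).length
        = (items.filter (fun x => decide ((toLex x.1 : Int ×ₗ Int)
            < toLex (items.getD (items.length / 2) ((0, 0), [])).1))).length :=
      PySem.List.length_sorted _ _ _
    have hmidlen' : (PySem.List.sorted (items.filter (fun x =>
        decide ((toLex x.1 : Int ×ₗ Int) = toLex (items.getD (items.length / 2) ((0, 0), [])).1)))
        (fun t => (toLex t.1 : Int ×ₗ Int)) false).length = 1 := by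
      rw [PySem.List.length_sorted]; exact hmidlen
    rw [PySem.List.len_eq] at hnlo
    have h1 : (items.filter (fun x => decide ((toLex x.1 : Int ×ₗ Int)
        < toLex (items.getD (items.length / 2) ((0, 0), [])).1))).length < k.toNat := by omega
    rw [List.take_of_length_le (by omega : (PySem.List.sorted (items.filter (fun x =>
        decide ((toLex x.1 : Int ×ₗ Int) < toLex (items.getD (items.length / 2) ((0, 0), [])).1)))
        (fun t => (toLex t.1 : Int ×ₗ Int)) false).length ≤ k.toNat)]
    rw [List.take_of_length_le (by omega : (PySem.List.sorted (items.filter (fun x =>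
        decide ((toLex x.1 : Int ×ₗ Int) = toLex (items.getD (items.length / 2) ((0, 0), [])).1)))
        (fun t => (toLex t.1 : Int ×ₗ Int)) false).length
          ≤ k.toNat - (PySem.List.sorted (items.filter (fun x =>
        decide ((toLex x.1 : Int ×ₗ Int) < toLex (items.getD (items.length / 2) ((0, 0), [])).1)))
        (fun t => (toLex t.1 : Int ×ₗ Int)) false).length)]
    rw [List.length_append, List.append_assoc]
    have harith : (k - ↑(items.filter (fun x => decide ((toLex x.1 : Int ×ₗ Int)
        < toLex (items.getD (items.length / 2) ((0, 0), [])).1))).length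
        - ↑(items.filter (fun x => decide ((toLex x.1 : Int ×ₗ Int)
            = toLex (items.getD (items.length / 2) ((0, 0), [])).1))).length).toNat
        = k.toNat - ((PySem.List.sorted (items.filter (fun x =>
            decide ((toLex x.1 : Int ×ₗ Int) < toLex (items.getD (items.length / 2) ((0, 0), [])).1)))
            (fun t => (toLex t.1 : Int ×ₗ Int)) false).length
          + (PySem.List.sorted (items.filter (fun x =>
            decide ((toLex x.1 : Int ×ₗ Int) = toLex (items.getD (items.length / 2) ((0, 0), [])).1)))
            (fun t => (toLex t.1 : Int ×ₗ Int)) false).length) := by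
      rw [hlolen, hmidlen']
      omega
    rw [← harith]
    exact (PySem.List.sorted_perm _ _ _).symm.append
      ((PySem.List.sorted_perm _ _ _).symm.append ih)

theorem ksmallest_sorted (items : List ((Int × Int) × List Int)) (k : Int)
    (hnd : (items.map (fun t => (toLex t.1 : Int ×ₗ Int))).Nodup) :
    PySem.List.sorted (ksmallest items k) (fun t => (toLex t.1 : Int ×ₗ Int)) false
      = (PySem.List.sorted items (fun t => (toLex t.1 : Int ×ₗ Int)) false).take k.toNat := by
  refine PySem.List.sorted_eq_of_perm_of_pairwise_lt _ _ _ (ksmallest_perm items k hnd).symm ?_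
  exact (sorted_pairwise_lt_of_nodup items _ hnd).sublist (List.take_sublist _ _)

theorem padLoopA_eq (k : Nat) (acc : List (List Int)) :
    padLoopA k acc = acc ++ List.replicate k [0, 0] := by
  induction k generalizing acc with
  | zero => simp [padLoopA]
  | succ k ih => simp [padLoopA, ih, List.replicate_succ]

-- ===== VERDICT (by name: the statement is the Claim_ definition above) =====
theorem pad_control_spec : Claim_equal_pad_control := by
  intro data _ _
  show pad_control data = pad_control_alt data
  have hnodup : (((PySem.List.enumerate data 0).map
      (fun p => ((-(PySem.List.pyGetD p.2 1 0), p.1), p.2))).map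
        (fun t => (toLex t.1 : Int ×ₗ Int))).Nodup := by
    rw [List.map_map]
    refine List.pairwise_map.mpr ?_
    refine (PySem.List.pairwise_lt_enumerate data 0).imp ?_
    intro p q hpq heq
    simp only [Function.comp_apply, toLex_inj, Prod.mk.injEq] at heq
    omega
  have hkey : (PySem.List.sorted (ksmallest ((PySem.List.enumerate data 0).map
      (fun p => ((-(PySem.List.pyGetD p.2 1 0), p.1), p.2))) 500)
      (fun t => (toLex t.1 : Int ×ₗ Int)) false).map (fun t => t.2)
      = (PySem.List.sorted data (fun x => PySem.List.pyGetD x 1 0) true).take 500 := by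
    rw [ksmallest_sorted _ _ hnodup]
    have h2 : PySem.List.sorted ((PySem.List.enumerate data 0).map
        (fun p => ((-(PySem.List.pyGetD p.2 1 0), p.1), p.2)))
        (fun t => (toLex t.1 : Int ×ₗ Int)) false
        = (PySem.List.sorted (PySem.List.enumerate data 0)
            (fun p => (toLex (-(PySem.List.pyGetD p.2 1 0), p.1) : Int ×ₗ Int)) false).map
            (fun p => ((-(PySem.List.pyGetD p.2 1 0), p.1), p.2)) :=
      sorted_map_eq _ _ _
    rw [h2, sorted_rev_via_enumerate data (fun x => PySem.List.pyGetD x 1 0)]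
    rw [← List.map_take, ← List.map_take, List.map_map]
    rfl
  simp only [pad_control, pad_control_alt]
  rw [hkey]
  congr 1
  rw [PySem.List.pyRepeat_singleton, PySem.List.len_eq, PySem.List.len_eq]
  by_cases h : (500 : Int) < ((PySem.List.sorted data (fun x => PySem.List.pyGetD x 1 0) true).length : Int)
  · rw [if_pos h, PySem.List.slice_to _ (by norm_num)]
    have hlen : ((PySem.List.sorted data (fun x => PySem.List.pyGetD x 1 0) true).take 500).length = 500 := by
      rw [List.length_take]
      omega
    rw [hlen]
    norm_num
    omega
  · rw [if_neg h, padLoopA_eq]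
    have hle : (PySem.List.sorted data (fun x => PySem.List.pyGetD x 1 0) true).length ≤ 500 := by
      omega
    rw [List.take_of_length_le hle]
    congr 2
    omega
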